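-- pv_equiv track=rewrite | github.com/Hong-Jinseo/Algorithm | programmers/42840.py | solution
-- ===== SOURCE A (Python) =====
-- def solution(answers):
--     answer = [0] * 3
--
--     ans_p1 = [1, 2, 3, 4, 5]  # 5
--     ans_p2 = [2, 1, 2, 3, 2, 4, 2, 5]  # 8
--     ans_p3 = [3, 3, 1, 1, 2, 2, 4, 4, 5, 5]  # 10
--
--     for i in range(len(answers)):
--         j1 = i % 5 if i > 4 else i
--         j2 = i % 8 if i > 7 else i
--         j3 = i % 10 if i > 9 else i
--
--         if answers[i] == ans_p1[j1]:
--             answer[0] += 1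
--
--         if answers[i] == ans_p2[j2]:
--             answer[1] += 1
--
--         if answers[i] == ans_p3[j3]:
--             answer[2] += 1
--
--     M = max(answer)
--     member = []
--
--     for i in range(3):
--         if answer[i] == M:
--             member.append(i + 1)
--
--     return member
-- ===== SOURCE B (Python) =====
-- def solution(answers):
--     # Bucket pass: tally each (position mod 40, answer) pair once (40 = lcm of the
--     # three pattern periods 5, 8, 10), then score each pattern from the 40-entry table.
--     cnt = {}
--     for i, a in enumerate(answers):
--         k = (i % 40, a)
--         cnt[k] = cnt.get(k, 0) + 1
--     patterns = [[1, 2, 3, 4, 5],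
--                 [2, 1, 2, 3, 2, 4, 2, 5],
--                 [3, 3, 1, 1, 2, 2, 4, 4, 5, 5]]
--     scores = [sum(cnt.get((r, p[r % len(p)]), 0) for r in range(40)) for p in patterns]
--     M = max(scores)
--     return [i + 1 for i, s in enumerate(scores) if s == M]
-- ===== Notes on version B (the rewrite author's own statement) =====
-- stated objective: alternative
-- what changed: Instead of comparing every answer against all three patterns in one modulo-indexed loop, B makes a single bucketing pass that tallies each (index mod 40, answer) pair into a dict (40 = lcm of the pattern periods 5, 8, 10) and then reads each pattern's score off a fixed 40-entry table scan; the finish becomes max plus an enumerate comprehension.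
import Mathlib
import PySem

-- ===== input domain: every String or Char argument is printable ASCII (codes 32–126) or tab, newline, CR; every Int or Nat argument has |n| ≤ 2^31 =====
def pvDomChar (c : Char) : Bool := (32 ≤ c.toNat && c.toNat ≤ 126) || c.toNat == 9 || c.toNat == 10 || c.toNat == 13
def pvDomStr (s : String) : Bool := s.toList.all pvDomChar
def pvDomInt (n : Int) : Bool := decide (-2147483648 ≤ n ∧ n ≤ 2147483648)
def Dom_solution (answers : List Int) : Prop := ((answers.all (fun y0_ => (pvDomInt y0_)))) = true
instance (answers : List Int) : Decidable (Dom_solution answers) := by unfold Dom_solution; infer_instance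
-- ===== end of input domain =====

-- B replaces A's per-element three-pattern-comparison loop by a different algorithm:
-- one bucketing pass tallies each (index mod 40, answer) pair (40 = lcm of the pattern
-- periods 5, 8, 10), then each pattern's score is read off a fixed 40-entry table scan
-- (alternative decomposition; same O(n) cost).

-- ===== PORT A =====
-- the loop body of A, as a named helper
def pvStepA (answers : List Int) (ans : List Int) (i : Int) : List Int :=
  let j1 : Int := if i > 4 then i % 5 else i
  let j2 : Int := if i > 7 then i % 8 else i
  let j3 : Int := if i > 9 then i % 10 else i
  let ans := if PySem.List.pyGetD answers i 0 = PySem.List.pyGetD [1, 2, 3, 4, 5] j1 0 then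
      PySem.List.pySetD ans 0 (PySem.List.pyGetD ans 0 0 + 1) else ans
  let ans := if PySem.List.pyGetD answers i 0 = PySem.List.pyGetD [2, 1, 2, 3, 2, 4, 2, 5] j2 0 then
      PySem.List.pySetD ans 1 (PySem.List.pyGetD ans 1 0 + 1) else ans
  let ans := if PySem.List.pyGetD answers i 0 = PySem.List.pyGetD [3, 3, 1, 1, 2, 2, 4, 4, 5, 5] j3 0 then
      PySem.List.pySetD ans 2 (PySem.List.pyGetD ans 2 0 + 1) else ans
  ans

-- A's local constants ans_p1/ans_p2/ans_p3 are inlined at their use sites.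
def solution (answers : List Int) : List Int :=
  let answer : List Int := List.replicate 3 0
  let answer := (PySem.List.pyRange 0 answers.length 1).foldl (pvStepA answers) answer
  let M := (PySem.List.max? answer (fun y => y)).getD 0
  let member := (PySem.List.pyRange 0 3 1).foldl
    (fun m i => if PySem.List.pyGetD answer i 0 = M then m ++ [i + 1] else m) []
  member

-- ===== PORT B =====
def pvPatterns : List (List Int) :=
  [[1, 2, 3, 4, 5], [2, 1, 2, 3, 2, 4, 2, 5], [3, 3, 1, 1, 2, 2, 4, 4, 5, 5]]

-- the bucketing pass: cnt[(i % 40, a)] += 1 for (i, a) in enumerate(answers)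
def pvCnt (answers : List Int) : PySem.Dict (Int × Int) Int :=
  (PySem.List.enumerate answers).foldl
    (fun d p =>
      let k : Int × Int := (PySem.Int.mod p.1 40, p.2)
      d.insert k (d.getD k 0 + 1))
    PySem.Dict.empty

-- one pattern's score read off the 40-entry table
def pvScoreB (cnt : PySem.Dict (Int × Int) Int) (pat : List Int) : Int :=
  ((PySem.List.pyRange 0 40 1).map
    (fun r => cnt.getD (r, PySem.List.pyGetD pat (PySem.Int.mod r (pat.length : Int)) 0) 0)).sum

def solution_alt (answers : List Int) : List Int :=
  let cnt := pvCnt answers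
  let scores := pvPatterns.map (fun pat => pvScoreB cnt pat)
  let M := (PySem.List.max? scores (fun y => y)).getD 0
  ((PySem.List.enumerate scores).filter (fun p => p.2 == M)).map (fun p => p.1 + 1)

-- ===== PRECONDITION & SPEC =====
def Spec_solution (answers : List Int) (out : List Int) : Prop := out = solution_alt answers
instance (answers : List Int) (out : List Int) : Decidable (Spec_solution answers out) := by unfold Spec_solution; infer_instance

-- ===== CLAIM (what is proved, stated in full; the proofs are below) =====
def Claim_equal_solution : Prop := ∀ (answers : List Int), Dom_solution answers → Spec_solution answers (solution answers)

-- ===== LEMMAS AND PROOFS =====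

-- indicator of answer i matching pattern `pat` (modulus L, threshold t), as A computes it
def pvInd (answers pat : List Int) (L t : Int) (i : Int) : Int :=
  if PySem.List.pyGetD answers i 0 = PySem.List.pyGetD pat (if i > t then i % L else i) 0 then 1 else 0

lemma pvStep (answers : List Int) (a b c x : Int) :
    pvStepA answers [a, b, c] x
    = [a + pvInd answers [1, 2, 3, 4, 5] 5 4 x,
       b + pvInd answers [2, 1, 2, 3, 2, 4, 2, 5] 8 7 x,
       c + pvInd answers [3, 3, 1, 1, 2, 2, 4, 4, 5, 5] 10 9 x] := by
  simp only [pvStepA, pvInd]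
  split_ifs <;>
    simp [PySem.List.pySetD, PySem.List.pySet?, PySem.List.pyGetD, PySem.List.pyGet?,
      PySem.List.pyIdx?]

lemma pvFoldA (answers : List Int) : ∀ (l : List Int) (a b c : Int),
    l.foldl (pvStepA answers) [a, b, c]
    = [a + (l.map (pvInd answers [1, 2, 3, 4, 5] 5 4)).sum,
       b + (l.map (pvInd answers [2, 1, 2, 3, 2, 4, 2, 5] 8 7)).sum,
       c + (l.map (pvInd answers [3, 3, 1, 1, 2, 2, 4, 4, 5, 5] 10 9)).sum] := by
  intro l
  induction l with
  | nil => intro a b c; simp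
  | cons x xs ih =>
    intro a b c
    rw [List.foldl_cons, pvStep, ih]
    simp [List.sum_cons, add_assoc]

-- sum over a duplicate-free list of a point indicator
lemma pvSumIte (c : Int) : ∀ (l : List Int) (m : Int), l.Nodup →
    ((l.map (fun r => if r = m then c else 0)).sum) = if m ∈ l then c else 0 := by
  intro l
  induction l with
  | nil => intro m _; simp
  | cons x xs ih =>
    intro m hnd
    rw [List.nodup_cons] at hnd
    by_cases hxm : x = m
    · subst hxm
      simp [ih x hnd.2, hnd.1]
    · simp only [List.map_cons, List.sum_cons, if_neg hxm, zero_add, ih m hnd.2,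
        List.mem_cons]
      by_cases hm : m ∈ xs <;> simp [hm, Ne.symm hxm]

lemma pvNodup40 : (PySem.List.pyRange 0 40 1).Nodup := by decide

-- sum over the residue table of counts = count of matching elements, for keys with first
-- component in [0, 40)
lemma pvSum40 (g : Int → Int) : ∀ (keys : List (Int × Int)),
    (∀ e ∈ keys, 0 ≤ e.1 ∧ e.1 < 40) →
    ((PySem.List.pyRange 0 40 1).map (fun r => ((keys.count (r, g r) : Nat) : Int))).sum
      = ((keys.countP (fun e => e.2 == g e.1) : Nat) : Int) := by
  intro keys
  induction keys with
  | nil => intro _; simp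
  | cons e ks ih =>
    intro h
    have he := h e (List.mem_cons_self)
    have hks : ∀ x ∈ ks, 0 ≤ x.1 ∧ x.1 < 40 := fun x hx => h x (List.mem_cons_of_mem _ hx)
    obtain ⟨m, a⟩ := e
    have hfun : ∀ r : Int,
        ((((m, a) :: ks).count (r, g r) : Nat) : Int)
          = ((ks.count (r, g r) : Nat) : Int)
            + (if r = m then (if a = g m then (1 : Int) else 0) else 0) := by
      intro r
      rw [List.count_cons]
      push_cast
      by_cases hr : r = m
      · subst hr
        simp [Prod.ext_iff]
      · simp [Prod.ext_iff, hr, Ne.symm hr]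
    calc ((PySem.List.pyRange 0 40 1).map (fun r => ((((m, a) :: ks).count (r, g r) : Nat) : Int))).sum
        = ((PySem.List.pyRange 0 40 1).map (fun r => ((ks.count (r, g r) : Nat) : Int))).sum
          + ((PySem.List.pyRange 0 40 1).map
              (fun r => if r = m then (if a = g m then (1 : Int) else 0) else 0)).sum := by
          rw [← PySem.List.sum_map_add_int]
          exact congrArg List.sum (List.map_congr_left (fun r _ => hfun r))
      _ = ((ks.countP (fun x => x.2 == g x.1) : Nat) : Int)
          + (if a = g m then (1 : Int) else 0) := by
          rw [ih hks, pvSumIte _ _ _ pvNodup40]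
          have : m ∈ PySem.List.pyRange 0 40 1 := by
            rw [PySem.List.mem_pyRange_one]; exact he
          simp [this]
      _ = ((((m, a) :: ks).countP (fun x => x.2 == g x.1) : Nat) : Int) := by
          rw [List.countP_cons]
          push_cast
          by_cases hv : a = g m <;> simp [hv, add_comm]

-- A's indicator sum over the whole input equals B's table score, for each pattern
lemma pvScore_eq (answers pat : List Int) (L t : Int) (hp : pat ≠ [])
    (hL : L = (pat.length : Int)) (ht : t = L - 1) (hdvd : L ∣ 40) :
    ((PySem.List.pyRange 0 (answers.length : Int) 1).map (pvInd answers pat L t)).sum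
      = pvScoreB (pvCnt answers) pat := by
  have hLpos : 0 < L := by
    rw [hL]; exact_mod_cast List.length_pos_of_ne_nil hp
  -- the lookup function of B's table
  set g : Int → Int := fun r => PySem.List.pyGetD pat (PySem.Int.mod r (pat.length : Int)) 0
    with hg
  -- keys produced by the bucketing pass
  set keys : List (Int × Int) :=
    (PySem.List.enumerate answers).map (fun p => (PySem.Int.mod p.1 40, p.2)) with hkeys
  -- B's score = sum of key counts over the table
  have hfold : pvCnt answers
      = keys.foldl (fun d k => d.insert k (d.getD k 0 + 1)) PySem.Dict.empty := by
    rw [hkeys, List.foldl_map]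
    rfl
  have hcnt : ∀ k : Int × Int, (pvCnt answers).getD k 0 = ((keys.count k : Nat) : Int) := by
    intro k
    rw [hfold, PySem.Dict.getD_foldl_insert_add_one]
    simp [PySem.Dict.empty, PySem.Dict.getD, PySem.Dict.get?]
  have hbound : ∀ e ∈ keys, 0 ≤ e.1 ∧ e.1 < 40 := by
    intro e he
    rw [hkeys] at he
    rcases List.mem_map.mp he with ⟨p, _, rfl⟩
    exact ⟨PySem.Int.mod_nonneg _ (by norm_num), PySem.Int.mod_lt _ (by norm_num)⟩
  have hB : pvScoreB (pvCnt answers) pat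
      = ((keys.countP (fun e => e.2 == g e.1) : Nat) : Int) := by
    unfold pvScoreB
    rw [← pvSum40 g keys hbound]
    exact congrArg List.sum (List.map_congr_left (fun r _ => hcnt _))
  rw [hB, hkeys, List.countP_map]
  -- unfold the enumeration into the index range
  rw [PySem.List.enumerate_eq_map_pyRange answers 0, List.countP_map, PySem.List.len]
  -- A's side: the 0/1 sum is a countP over the same range
  have hA : ((PySem.List.pyRange 0 (answers.length : Int) 1).map (pvInd answers pat L t)).sum
      = (((PySem.List.pyRange 0 (answers.length : Int) 1).countP
          (fun i => PySem.List.pyGetD answers i 0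
            == PySem.List.pyGetD pat (if i > t then i % L else i) 0) : Nat) : Int) := by
    rw [← PySem.List.sum_map_ite_one_zero]
    exact congrArg List.sum (List.map_congr_left (fun i _ => by
      simp [pvInd, beq_iff_eq]))
  rw [hA]
  congr 1
  apply List.countP_congr
  intro i hi
  have h0i : 0 ≤ i := (PySem.List.mem_pyRange_one.mp hi).1
  have hidx : (if i > t then i % L else i) = PySem.Int.mod (PySem.Int.mod i 40) (pat.length : Int) := by
    have hmod40 : PySem.Int.mod i 40 = i % 40 := PySem.Int.mod_eq_emod_of_pos (by norm_num)
    have hmodL : PySem.Int.mod (i % 40) (pat.length : Int) = (i % 40) % L := by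
      rw [← hL]; exact PySem.Int.mod_eq_emod_of_pos hLpos
    rw [hmod40, hmodL, Int.emod_emod_of_dvd i hdvd]
    by_cases hgt : i > t
    · simp [hgt]
    · have : 0 ≤ i ∧ i < L := ⟨h0i, by omega⟩
      simp [hgt, Int.emod_eq_of_lt this.1 this.2]
  simp only [Function.comp, hg, hidx]

lemma pvFinal (s1 s2 s3 M : Int) :
    (PySem.List.pyRange 0 3 1).foldl
      (fun m i => if PySem.List.pyGetD [s1, s2, s3] i 0 = M then m ++ [i + 1] else m) ([] : List Int)
    = ((PySem.List.enumerate [s1, s2, s3]).filter (fun p => p.2 == M)).map (fun p => p.1 + 1) := by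
  have h3 : PySem.List.pyRange 0 3 1 = [0, 1, 2] := by decide
  rw [h3]
  by_cases h0 : s1 = M <;> by_cases h1 : s2 = M <;> by_cases h2 : s3 = M <;>
    simp [PySem.List.enumerate, PySem.List.pyGetD, PySem.List.pyGet?, PySem.List.pyIdx?,
      h0, h1, h2]

lemma pvMain (answers : List Int) : solution answers = solution_alt answers := by
  unfold solution solution_alt
  simp only [show (List.replicate 3 (0 : Int)) = [0, 0, 0] from rfl]
  rw [pvFoldA]
  simp only [zero_add]
  rw [pvScore_eq answers [1, 2, 3, 4, 5] 5 4 (by decide) (by decide) (by decide) (by decide),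
    pvScore_eq answers [2, 1, 2, 3, 2, 4, 2, 5] 8 7 (by decide) (by decide) (by decide) (by decide),
    pvScore_eq answers [3, 3, 1, 1, 2, 2, 4, 4, 5, 5] 10 9 (by decide) (by decide) (by decide) (by decide)]
  simp only [pvPatterns, List.map]
  rw [pvFinal]

-- ===== VERDICT (by name: the statement is the Claim_ definition above) =====
theorem solution_spec : Claim_equal_solution := by
  intro answers _
  exact pvMain answers
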